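-- pv_equiv track=rewrite | github.com/IsaacBenson1/PokerBot | PokerGame.py | update_blind_level
-- ===== SOURCE A (Python) =====
-- def update_blind_level(ante, sb_amount, round_count, blind_structure):
--     level_thresholds = sorted(blind_structure.keys())
--     current_level_pos = [r <= round_count for r in level_thresholds].count(True)-1
--     if current_level_pos != -1:
--         current_level_key = level_thresholds[current_level_pos]
--         update_info = blind_structure[current_level_key]
--         ante, sb_amount = update_info["ante"], update_info["small_blind"]
--     return ante, sb_amount
-- ===== SOURCE B (Python) =====
-- def update_blind_level(ante, sb_amount, round_count, blind_structure):
--     eligible = [k for k in blind_structure if k <= round_count]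
--     if not eligible:
--         return ante, sb_amount
--     info = blind_structure[max(eligible)]
--     return info["ante"], info["small_blind"]
-- ===== Notes on version B (the rewrite author's own statement) =====
-- stated objective: simpler
-- what changed: B replaces A's sort-then-count-the-True-flags index arithmetic by a single filter of the eligible keys and max() over them, with no sorting, no boolean list and no index computation.
import Mathlib
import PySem

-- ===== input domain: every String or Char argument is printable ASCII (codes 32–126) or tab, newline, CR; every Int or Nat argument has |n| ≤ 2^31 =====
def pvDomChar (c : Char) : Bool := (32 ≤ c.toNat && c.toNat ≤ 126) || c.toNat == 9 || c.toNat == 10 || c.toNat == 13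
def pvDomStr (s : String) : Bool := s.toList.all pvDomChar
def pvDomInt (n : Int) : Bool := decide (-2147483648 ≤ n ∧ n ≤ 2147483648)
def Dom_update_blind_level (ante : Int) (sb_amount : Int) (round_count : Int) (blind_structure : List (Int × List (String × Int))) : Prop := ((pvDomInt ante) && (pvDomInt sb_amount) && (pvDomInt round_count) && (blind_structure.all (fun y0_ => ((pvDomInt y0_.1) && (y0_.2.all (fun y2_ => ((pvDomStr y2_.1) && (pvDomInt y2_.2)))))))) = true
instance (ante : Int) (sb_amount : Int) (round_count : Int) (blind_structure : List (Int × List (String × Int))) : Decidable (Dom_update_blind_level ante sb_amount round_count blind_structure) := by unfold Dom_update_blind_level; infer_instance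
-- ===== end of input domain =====

-- B replaces A's sort-then-count-True-flags indexing by filtering the eligible keys and taking their max; objective: simpler.


-- ===== PORT A =====
-- shared with port B: the final dict lookups 'blind_structure[key]' / update_info["ante"/"small_blind"],
-- which both Pythons perform verbatim (none = KeyError, excluded by Pre_; the fallback value is never
-- reached inside Pre_)
def pvLookup (ante : Int) (sb_amount : Int)
    (blind_structure : List (Int × List (String × Int))) (key : Int) : Int × Int :=
  match PySem.Dict.get? (PySem.Dict.mk blind_structure) key with
  | none => (ante, sb_amount)
  | some info =>
    match PySem.Dict.get? (PySem.Dict.mk info) "ante",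
          PySem.Dict.get? (PySem.Dict.mk info) "small_blind" with
    | some a, some s => (a, s)
    | _, _ => (ante, sb_amount)

def update_blind_level (ante : Int) (sb_amount : Int) (round_count : Int) (blind_structure : List (Int × List (String × Int))) : Int × Int :=
  let level_thresholds := PySem.List.sorted (PySem.Dict.keys (PySem.Dict.mk blind_structure)) (fun x => x)
  let current_level_pos : Int :=
    ((level_thresholds.map (fun r => decide (r ≤ round_count))).count true : Int) - 1
  if current_level_pos ≠ -1 then
    match PySem.List.pyGet? level_thresholds current_level_pos with
    | none => (ante, sb_amount)          -- IndexError: unreachable (the position is always in range)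
    | some current_level_key => pvLookup ante sb_amount blind_structure current_level_key
  else (ante, sb_amount)

-- ===== PORT B =====
def update_blind_level_alt (ante : Int) (sb_amount : Int) (round_count : Int) (blind_structure : List (Int × List (String × Int))) : Int × Int :=
  let eligible := (PySem.Dict.keys (PySem.Dict.mk blind_structure)).filter (fun k => decide (k ≤ round_count))
  match PySem.List.max? eligible (fun x => x) with
  | none => (ante, sb_amount)
  | some key => pvLookup ante sb_amount blind_structure key

-- ===== PRECONDITION & SPEC =====
-- Pre_ excludes (a) association lists with duplicate keys (outer, or inner in the selected entry's dict):
-- a Python dict cannot carry them, so the ports' first-match reading of such a list is not A's behaviour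
-- on any real dict input; and (b) inputs whose selected entry lacks an "ante" or "small_blind" field,
-- on which A raises KeyError.
def Pre_update_blind_level (ante : Int) (sb_amount : Int) (round_count : Int) (blind_structure : List (Int × List (String × Int))) : Prop :=
  (blind_structure.map Prod.fst).Nodup ∧
  ∀ p ∈ blind_structure,
    (p.2.map Prod.fst).Nodup ∧
    (p.1 ≤ round_count → (∀ q ∈ blind_structure, q.1 ≤ round_count → q.1 ≤ p.1) →
      ("ante" ∈ p.2.map Prod.fst ∧ "small_blind" ∈ p.2.map Prod.fst))
instance (ante : Int) (sb_amount : Int) (round_count : Int) (blind_structure : List (Int × List (String × Int))) : Decidable (Pre_update_blind_level ante sb_amount round_count blind_structure) := by unfold Pre_update_blind_level; infer_instance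

def pvWitness_update_blind_level : Int × Int × Int × (List (Int × List (String × Int))) :=
  (1, 2, 5, [(3, [("ante", 7), ("small_blind", 8)])])

def Spec_update_blind_level (ante : Int) (sb_amount : Int) (round_count : Int) (blind_structure : List (Int × List (String × Int))) (out : Int × Int) : Prop := out = update_blind_level_alt ante sb_amount round_count blind_structure
instance (ante : Int) (sb_amount : Int) (round_count : Int) (blind_structure : List (Int × List (String × Int))) (out : Int × Int) : Decidable (Spec_update_blind_level ante sb_amount round_count blind_structure out) := by unfold Spec_update_blind_level; infer_instance

-- ===== CLAIM (what is proved, stated in full; the proofs are below) =====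
def Claim_equal_update_blind_level : Prop := ∀ (ante : Int) (sb_amount : Int) (round_count : Int) (blind_structure : List (Int × List (String × Int))), Dom_update_blind_level ante sb_amount round_count blind_structure → Pre_update_blind_level ante sb_amount round_count blind_structure → Spec_update_blind_level ante sb_amount round_count blind_structure (update_blind_level ante sb_amount round_count blind_structure)

-- ===== LEMMAS AND PROOFS =====

-- count true over a map-to-Bool is countP
theorem pv_count_map_true (L : List Int) (rc : Int) :
    (L.map (fun r => decide (r ≤ rc))).count true = L.countP (fun r => decide (r ≤ rc)) := by
  induction L with
  | nil => rfl
  | cons x t ih =>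
    by_cases h : x ≤ rc <;>
      simp [h, ih]

-- in a ≤-sorted list the elements satisfying (· ≤ rc) are exactly the first countP positions
theorem pv_sorted_prefix (L : List Int) (rc : Int) (hs : L.Pairwise (· ≤ ·)) :
    ∀ i (hi : i < L.length), (L[i] ≤ rc ↔ i < L.countP (fun r => decide (r ≤ rc))) := by
  induction L with
  | nil => intro i hi; simp at hi
  | cons x t ih =>
    intro i hi
    rcases List.pairwise_cons.mp hs with ⟨hx, ht⟩
    by_cases hxrc : x ≤ rc
    · cases i with
      | zero => simp [hxrc]
      | succ j =>
        have hj : j < t.length := by simpa using hi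
        have := ih ht j hj
        simp only [List.getElem_cons_succ, List.countP_cons, hxrc]
        simpa [Nat.succ_lt_succ_iff] using this
    · -- x > rc, so every element of x :: t exceeds rc and countP = 0
      have hall : ∀ y ∈ t, ¬ y ≤ rc := fun y hy hle => hxrc (le_trans (hx y hy) hle)
      have hcz : t.countP (fun r => decide (r ≤ rc)) = 0 :=
        List.countP_eq_zero.mpr (by intro y hy; simpa using hall y hy)
      cases i with
      | zero => simp [hxrc, hcz]
      | succ j =>
        have hj : j < t.length := by simpa using hi
        simp [hxrc, hcz, hall _ (List.getElem_mem hj)]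

-- foldl max is an upper bound and is attained
theorem pv_foldl_max (t : List Int) (a : Int) :
    (t.foldl max a ∈ a :: t) ∧ a ≤ t.foldl max a ∧ ∀ y ∈ t, y ≤ t.foldl max a := by
  induction t generalizing a with
  | nil => simp
  | cons x s ih =>
    rcases ih (max a x) with ⟨hmem, hle, hub⟩
    refine ⟨?_, by simpa only [List.foldl_cons] using le_trans (le_max_left a x) hle, ?_⟩
    · simp only [List.foldl_cons]
      rcases List.mem_cons.mp hmem with h | h
      · rcases max_choice a x with hc | hc <;> rw [h, hc] <;> simp
      · simp [h]
    · intro y hy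
      simp only [List.foldl_cons]
      rcases List.mem_cons.mp hy with h | h
      · rw [h]; exact le_trans (le_max_right a x) hle
      · exact hub y h

-- max? id returns the (unique) upper bound that is a member
theorem pv_max?_eq (xs : List Int) (m : Int) (hm : m ∈ xs) (hub : ∀ y ∈ xs, y ≤ m) :
    PySem.List.max? xs (fun x => x) = some m := by
  cases xs with
  | nil => simp at hm
  | cons x t =>
    rw [PySem.List.max?_id_cons]
    rcases pv_foldl_max t x with ⟨hmem, hle, htub⟩
    have h1 : t.foldl max x ≤ m := hub _ hmem
    have h2 : m ≤ t.foldl max x := by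
      rcases List.mem_cons.mp hm with h | h
      · exact h ▸ hle
      · exact htub m h
    exact congrArg some (le_antisymm h1 h2)

theorem update_blind_level_eq (ante sb_amount round_count : Int)
    (bs : List (Int × List (String × Int))) :
    update_blind_level ante sb_amount round_count bs
      = update_blind_level_alt ante sb_amount round_count bs := by
  unfold update_blind_level update_blind_level_alt
  set keys := PySem.Dict.keys (PySem.Dict.mk bs) with hkeys
  set L := PySem.List.sorted keys (fun x => x) with hL
  have hs : L.Pairwise (· ≤ ·) := PySem.List.sorted_pairwise keys (fun x => x)
  have hmemL : ∀ x, x ∈ L ↔ x ∈ keys := fun x => PySem.List.mem_sorted keys _ _ x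
  set c := L.countP (fun r => decide (r ≤ round_count)) with hc
  have hcount : (L.map (fun r => decide (r ≤ round_count))).count true = c :=
    pv_count_map_true L round_count
  have hclen : c ≤ L.length := List.countP_le_length
  by_cases hc0 : c = 0
  · -- no eligible key: A's position is -1, B's filter is empty
    have hfil : keys.filter (fun k => decide (k ≤ round_count)) = [] := by
      refine List.filter_eq_nil_iff.mpr (fun y hy => ?_)
      have hyL : y ∈ L := (hmemL y).mpr hy
      rcases List.mem_iff_getElem.mp hyL with ⟨i, hi, rfl⟩
      have := (pv_sorted_prefix L round_count hs i hi).not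
      simp only [← hc, hc0] at this
      simpa using this.mpr (by omega)
    simp [hcount, hc0, hfil, PySem.List.max?]
  · -- c ≥ 1: A indexes L[c-1], B takes max of the eligible keys; they coincide
    have hc1 : 1 ≤ c := Nat.one_le_iff_ne_zero.mpr hc0
    have hidx : c - 1 < L.length := by omega
    have hcast : ((L.map (fun r => decide (r ≤ round_count))).count true : Int) - 1
        = ((c - 1 : Nat) : Int) := by rw [hcount]; omega
    have hget : PySem.List.pyGet? L (((L.map (fun r => decide (r ≤ round_count))).count true : Int) - 1)
        = some L[c-1] := by
      rw [hcast, PySem.List.pyGet?_natCast]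
      simp [hidx]
    have hm_le : L[c-1] ≤ round_count :=
      (pv_sorted_prefix L round_count hs (c-1) hidx).mpr (by omega)
    have hub : ∀ y ∈ keys.filter (fun k => decide (k ≤ round_count)), y ≤ L[c-1] := by
      intro y hy
      rcases List.mem_filter.mp hy with ⟨hyk, hyle⟩
      have hyL : y ∈ L := (hmemL y).mpr hyk
      rcases List.mem_iff_getElem.mp hyL with ⟨i, hi, rfl⟩
      have hic : i < c := (pv_sorted_prefix L round_count hs i hi).mp (by simpa using hyle)
      have hile : i ≤ c - 1 := by omega
      exact PySem.List.sorted_id_getElem_mono keys hile hidx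
    have hmem : L[c-1] ∈ keys.filter (fun k => decide (k ≤ round_count)) :=
      List.mem_filter.mpr ⟨(hmemL _).mp (List.getElem_mem hidx), by simpa using hm_le⟩
    have hmax : PySem.List.max? (keys.filter (fun k => decide (k ≤ round_count))) (fun x => x)
        = some L[c-1] := pv_max?_eq _ _ hmem hub
    have hne : ((L.map (fun r => decide (r ≤ round_count))).count true : Int) - 1 ≠ -1 := by
      rw [hcount]; omega
    simp only [hget, hmax]
    rw [if_pos hne]

-- ===== VERDICT (by name: the statement is the Claim_ definition above) =====
theorem update_blind_level_spec : Claim_equal_update_blind_level := by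
  intro ante sb rc bs _ _
  unfold Spec_update_blind_level
  exact update_blind_level_eq ante sb rc bs
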